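-- pv_equiv track=rewrite | github.com/keshavbhandari/Audioneme | src/utils/data_v2.py | get_tasks_encoded
-- ===== SOURCE A (Python) =====
-- def get_tasks_encoded(raw_wav_files):
--     task_numbered = dict()
--     numbered_task = dict()
--     counter = 0
--     for file in raw_wav_files:
--         s = file.lower()
--         if s not in task_numbered.keys():
--             task_numbered[s] = counter
--             numbered_task[str(counter)] = s
--             counter += 1
--
--     return task_numbered, numbered_task
-- ===== SOURCE B (Python) =====
-- def get_tasks_encoded(raw_wav_files):
--     # positional algorithm: a reverse pass records each lowercased name's
--     # first-occurrence index (later, i.e. smaller, indices overwrite), then a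
--     # positional filter keeps lows[i] exactly when i is that first occurrence.
--     lows = [f.lower() for f in raw_wav_files]
--     first = {}
--     for i in range(len(lows) - 1, -1, -1):
--         first[lows[i]] = i
--     uniques = [s for i, s in enumerate(lows) if first[s] == i]
--     n = len(uniques)
--     task_numbered = dict(zip(uniques, range(n)))
--     numbered_task = dict(zip(map(str, range(n)), uniques))
--     return task_numbered, numbered_task
-- ===== Notes on version B (the rewrite author's own statement) =====
-- stated objective: alternative
-- what changed: A's single stateful loop (membership test against the dict being built plus a manual counter) is replaced by a positional algorithm: a reverse pass records each lowercased name's first-occurrence index by last-write-wins overwriting, a forward filter keeps lows[i] iff first[lows[i]] == i, and both dicts are assembled by zipping that unique list with range(n).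
import Mathlib
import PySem

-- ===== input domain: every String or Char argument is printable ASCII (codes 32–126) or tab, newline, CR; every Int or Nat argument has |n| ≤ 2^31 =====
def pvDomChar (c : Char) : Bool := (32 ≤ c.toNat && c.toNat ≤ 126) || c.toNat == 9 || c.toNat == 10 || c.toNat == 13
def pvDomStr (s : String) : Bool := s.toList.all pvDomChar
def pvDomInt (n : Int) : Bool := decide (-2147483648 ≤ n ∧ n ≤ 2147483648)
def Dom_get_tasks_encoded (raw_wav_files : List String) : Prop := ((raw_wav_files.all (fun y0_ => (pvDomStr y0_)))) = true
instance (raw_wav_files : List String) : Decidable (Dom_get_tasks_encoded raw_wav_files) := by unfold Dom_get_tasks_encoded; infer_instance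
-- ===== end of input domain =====

-- B replaces A's stateful seen-dict-plus-counter loop by a positional algorithm (keep lows[i]
-- iff absent from the prefix lows[:i], then zip with range); objective: alternative.

-- ===== PORT A =====
-- one interleaved loop: two dicts and a counter, inserting only on a fresh lowercased key
def get_tasks_encoded (raw_wav_files : List String) : (List (String × Int)) × (List (String × String)) :=
  let st := raw_wav_files.foldl
    (fun (st : PySem.Dict String Int × PySem.Dict String String × Int) file =>
      let s := PySem.Str.lower file
      if ¬ st.1.contains s then
        (st.1.insert s st.2.2, st.2.1.insert (PySem.Int.toStr st.2.2) s, st.2.2 + 1)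
      else st)
    (PySem.Dict.empty, PySem.Dict.empty, 0)
  (st.1.items, st.2.1.items)

-- ===== PORT B =====
-- reverse pass recording first-occurrence indices, positional filter, then dict(zip(...));
-- Python's first[s] never raises here (every s is a key), ported as getD with an unused default
def get_tasks_encoded_alt (raw_wav_files : List String) : (List (String × Int)) × (List (String × String)) :=
  let lows := raw_wav_files.map PySem.Str.lower
  let first := (PySem.List.pyRange ((lows.length : Int) - 1) (-1) (-1)).foldl
      (fun (d : PySem.Dict String Int) i => d.insert (PySem.List.pyGetD lows i "") i)
      PySem.Dict.empty
  let uniques := ((PySem.List.enumerate lows 0).filter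
      (fun p => first.getD p.2 (-1) == p.1)).map (·.2)
  let n := (uniques.length : Int)
  let task_numbered := (uniques.zip (PySem.List.pyRange 0 n 1)).foldl
      (fun (d : PySem.Dict String Int) p => d.insert p.1 p.2) PySem.Dict.empty
  let numbered_task := (((PySem.List.pyRange 0 n 1).map PySem.Int.toStr).zip uniques).foldl
      (fun (d : PySem.Dict String String) p => d.insert p.1 p.2) PySem.Dict.empty
  (task_numbered.items, numbered_task.items)

-- ===== PRECONDITION & SPEC =====
def Spec_get_tasks_encoded (raw_wav_files : List String) (out : (List (String × Int)) × (List (String × String))) : Prop := out = get_tasks_encoded_alt raw_wav_files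
instance (raw_wav_files : List String) (out : (List (String × Int)) × (List (String × String))) : Decidable (Spec_get_tasks_encoded raw_wav_files out) := by unfold Spec_get_tasks_encoded; infer_instance

-- ===== CLAIM (what is proved, stated in full; the proofs are below) =====
def Claim_equal_get_tasks_encoded : Prop := ∀ (raw_wav_files : List String), Dom_get_tasks_encoded raw_wav_files → Spec_get_tasks_encoded raw_wav_files (get_tasks_encoded raw_wav_files)

-- ===== LEMMAS AND PROOFS =====

-- the abstract state corresponding to a list u of unique keys seen so far
def pvTN (u : List String) : PySem.Dict String Int :=
  PySem.Dict.mk ((PySem.List.enumerate u 0).map (fun p => (p.2, p.1)))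

def pvNT (u : List String) : PySem.Dict String String :=
  PySem.Dict.mk ((PySem.List.enumerate u 0).map (fun p => (PySem.Int.toStr p.1, p.2)))

theorem pvTN_keys (u : List String) : (pvTN u).keys = u := by
  simp [pvTN, PySem.Dict.keys, List.map_map, Function.comp_def, PySem.List.map_snd_enumerate]

theorem pvTN_contains (u : List String) (s : String) :
    (pvTN u).contains s = decide (s ∈ u) := by
  rw [PySem.Dict.contains_eq_decide_mem_keys, pvTN_keys]

theorem pvTN_snoc (u : List String) (s : String) (hs : s ∉ u) :
    (pvTN u).insert s (u.length : Int) = pvTN (u ++ [s]) := by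
  apply PySem.Dict.ext
  rw [PySem.Dict.items_insert_of_not_contains]
  · simp [pvTN, PySem.List.enumerate_append, PySem.List.enumerate_cons]
  · rw [pvTN_contains]; simpa using hs

-- str(k) ≠ str(m) for distinct naturals: decode Nat.toDigits by a left fold
def pvDec (l : List Char) : Nat := l.foldl (fun a c => 10 * a + (c.toNat - 48)) 0

theorem pvDigitChar_toNat (d : Nat) (hd : d < 10) : (Nat.digitChar d).toNat - 48 = d := by
  interval_cases d <;> decide

theorem pvDecCore (f : Nat) : ∀ (n : Nat) (acc : List Char) (a : Nat), n < f →
    (Nat.toDigitsCore 10 f n acc).foldl (fun a c => 10 * a + (c.toNat - 48)) a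
      = acc.foldl (fun a c => 10 * a + (c.toNat - 48)) (a * 10 ^ (Nat.log 10 n + 1) + n) := by
  induction f with
  | zero => intro n acc a h; omega
  | succ f ih =>
    intro n acc a h
    rw [Nat.toDigitsCore]
    by_cases h10 : n / 10 = 0
    · have hn : n < 10 := by omega
      have hlog : Nat.log 10 n = 0 := Nat.log_eq_zero_iff.mpr (Or.inl hn)
      simp only [h10, if_true, List.foldl_cons, Nat.mod_eq_of_lt hn,
        pvDigitChar_toNat n hn, hlog, Nat.zero_add, pow_one]
      congr 1
      omega
    · simp only [h10, if_false]
      have hn10 : 10 ≤ n := by omega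
      have hlt : n / 10 < f := by omega
      rw [ih (n / 10) _ a hlt]
      have hlog : Nat.log 10 n = Nat.log 10 (n / 10) + 1 := by
        rw [Nat.log_div_base 10 n] at *
        have : 0 < Nat.log 10 n := Nat.log_pos (by norm_num) hn10
        omega
      simp only [List.foldl_cons, pvDigitChar_toNat (n % 10) (by omega), hlog]
      ring_nf
      congr 1
      omega

theorem pvDec_toDigits (n : Nat) : pvDec (Nat.toDigits 10 n) = n := by
  unfold pvDec Nat.toDigits
  rw [pvDecCore (n + 1) n [] 0 (by omega)]
  simp

theorem pvToStr_nat_inj (a b : Nat)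
    (h : PySem.Int.toStr (a : Int) = PySem.Int.toStr (b : Int)) : a = b := by
  have hc : PySem.Int.toChars (a : Int) = PySem.Int.toChars (b : Int) := by
    have := congrArg String.toList h
    simpa [PySem.Int.toList_toStr] using this
  have hd : Nat.toDigits 10 a = Nat.toDigits 10 b := by
    simpa [PySem.Int.toChars, show ¬((a : Int) < 0) by omega, show ¬((b : Int) < 0) by omega]
      using hc
  have := congrArg pvDec hd
  simpa [pvDec_toDigits] using this

theorem pvNT_snoc (u : List String) (s : String) :
    (pvNT u).insert (PySem.Int.toStr (u.length : Int)) s = pvNT (u ++ [s]) := by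
  apply PySem.Dict.ext
  rw [PySem.Dict.items_insert_of_not_contains]
  · simp [pvNT, PySem.List.enumerate_append, PySem.List.enumerate_cons]
  · rw [PySem.Dict.contains_eq_decide_mem_keys]
    simp only [pvNT, PySem.Dict.keys_mk, List.map_map, decide_eq_false_iff_not]
    intro hmem
    obtain ⟨p, hp, hps⟩ := List.mem_map.mp hmem
    obtain ⟨k, hk, hpk⟩ := (PySem.List.mem_enumerate_iff u 0 p).mp hp
    have : p.1 = (k : Int) := by rw [hpk]; simp
    have hlt : (k : Int) < (u.length : Int) := by exact_mod_cast hk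
    have : PySem.Int.toStr (k : Int) = PySem.Int.toStr (u.length : Int) := by
      simpa [this] using hps
    have := pvToStr_nat_inj k u.length (by simpa using this)
    omega

-- the loop invariant for A: folding A's step from the state of u is the state of the extended unique list
theorem pv_loop (l : List String) : ∀ (u : List String), u.Nodup →
    l.foldl
      (fun (st : PySem.Dict String Int × PySem.Dict String String × Int) file =>
        let s := PySem.Str.lower file
        if ¬ st.1.contains s then
          (st.1.insert s st.2.2, st.2.1.insert (PySem.Int.toStr st.2.2) s, st.2.2 + 1)
        else st)
      (pvTN u, pvNT u, (u.length : Int))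
    = (let u' := l.foldl (fun u f => PySem.Set.add u (PySem.Str.lower f)) u
       (pvTN u', pvNT u', (u'.length : Int))) := by
  induction l with
  | nil => intro u _; rfl
  | cons f l ih =>
    intro u hu
    simp only [List.foldl_cons]
    by_cases hmem : PySem.Str.lower f ∈ u
    · rw [show (if ¬ (pvTN u).contains (PySem.Str.lower f) then _ else (pvTN u, pvNT u, (u.length : Int))) = (pvTN u, pvNT u, (u.length : Int)) by
        simp [pvTN_contains, hmem]]
      rw [PySem.Set.add_of_mem hmem]
      exact ih u hu
    · rw [show (if ¬ (pvTN u).contains (PySem.Str.lower f) then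
          ((pvTN u).insert (PySem.Str.lower f) (u.length : Int),
           (pvNT u).insert (PySem.Int.toStr (u.length : Int)) (PySem.Str.lower f),
           (u.length : Int) + 1) else _)
          = (pvTN (u ++ [PySem.Str.lower f]), pvNT (u ++ [PySem.Str.lower f]), ((u ++ [PySem.Str.lower f]).length : Int)) by
        simp only [pvTN_contains, hmem, decide_false]
        rw [pvTN_snoc u _ hmem, pvNT_snoc]
        simp]
      rw [PySem.Set.add_of_not_mem hmem]
      refine ih _ ?_
      simp only [List.nodup_append, List.nodup_cons, List.nodup_nil, and_true]
      refine ⟨hu, List.not_mem_nil, ?_⟩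
      intro a ha b hb
      simp only [List.mem_singleton] at hb
      subst hb
      exact fun h => hmem (h ▸ ha)

-- B's positional first-occurrence filter computes the ordered set of the list
theorem pv_filter_prefix (lows : List String) :
    ((PySem.List.enumerate lows 0).filter
        (fun p => !(decide (p.2 ∈ PySem.List.slice lows none (some p.1))))).map (·.2)
      = PySem.Set.ofList lows := by
  induction lows using List.reverseRecOn with
  | nil => rfl
  | append_singleton full x ih =>
    rw [PySem.List.enumerate_append, List.filter_append, List.map_append,
        PySem.List.enumerate_cons, PySem.List.enumerate_nil]
    have h1 : (PySem.List.enumerate full 0).filter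
        (fun p => !(decide (p.2 ∈ PySem.List.slice (full ++ [x]) none (some p.1))))
      = (PySem.List.enumerate full 0).filter
        (fun p => !(decide (p.2 ∈ PySem.List.slice full none (some p.1)))) := by
      apply List.filter_congr
      intro p hp
      obtain ⟨k, hk, hpk⟩ := (PySem.List.mem_enumerate_iff full 0 p).mp hp
      subst hpk
      simp only [Int.zero_add]
      rw [PySem.List.slice_to_natCast, PySem.List.slice_to_natCast,
          List.take_append_of_le_length (by omega)]
    rw [h1, ih]
    have h2 : PySem.List.slice (full ++ [x]) none (some ((0 : Int) + (full.length : Int)))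
        = full := by
      rw [show (0 : Int) + (full.length : Int) = (full.length : Int) by ring,
          PySem.List.slice_to_natCast]
      simp
    rw [show PySem.Set.ofList (full ++ [x]) = PySem.Set.add (PySem.Set.ofList full) x by
      simp [PySem.Set.ofList_eq_foldl, List.foldl_append]]
    by_cases hmem : x ∈ full
    · rw [PySem.Set.add_of_mem (by simpa [PySem.Set.mem_ofList] using hmem)]
      simp [hmem]
    · rw [PySem.Set.add_of_not_mem (by simpa [PySem.Set.mem_ofList] using hmem)]
      simp [hmem]

-- folding inserts keyed by `key i` over a list of indices: the LAST insert for a key wins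
theorem pv_fold_insert_get? (l : List Int) (key : Int → String) (d : PySem.Dict String Int)
    (x : String) :
    (l.foldl (fun d i => d.insert (key i) i) d).get? x
      = (l.reverse.find? (fun i => key i == x)).or (d.get? x) := by
  induction l generalizing d with
  | nil => simp
  | cons i rest ih =>
    simp only [List.foldl_cons, List.reverse_cons, List.find?_append, ih, Option.or_assoc]
    congr 1
    rw [PySem.Dict.get?_insert]
    simp only [List.find?_cons, List.find?_nil]
    by_cases hx : x = key i
    · simp [hx]
    · have hb : (key i == x) = false := beq_eq_false_iff_ne.mpr (fun h => hx h.symm)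
      simp [hb, hx]

-- the reverse-pass dict looks up the FIRST index carrying x (or none)
theorem pv_first_get? (lows : List String) (x : String) :
    ((PySem.List.pyRange ((lows.length : Int) - 1) (-1) (-1)).foldl
        (fun (d : PySem.Dict String Int) i => d.insert (PySem.List.pyGetD lows i "") i)
        PySem.Dict.empty).get? x
      = (PySem.List.pyRange 0 (lows.length : Int) 1).find?
          (fun i => PySem.List.pyGetD lows i "" == x) := by
  rw [pv_fold_insert_get?, PySem.List.pyRange_neg_one_eq_reverse, List.reverse_reverse,
      PySem.Dict.get?_empty, Option.or_none]
  norm_num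

-- the positional test first[lows[k]] == k is the prefix-absence test
theorem pv_cond (lows : List String) (k : Nat) (hk : k < lows.length) :
    (((PySem.List.pyRange ((lows.length : Int) - 1) (-1) (-1)).foldl
        (fun (d : PySem.Dict String Int) i => d.insert (PySem.List.pyGetD lows i "") i)
        PySem.Dict.empty).getD lows[k] (-1) == (k : Int))
      = !(decide (lows[k] ∈ lows.take k)) := by
  rw [PySem.Dict.getD_eq_get?_getD, pv_first_get?]
  rw [PySem.List.pyRange_one_append 0 (k : Int) (lows.length : Int) (by omega) (by omega),
      List.find?_append]
  by_cases hmem : lows[k] ∈ lows.take k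
  · obtain ⟨j, hj, hje⟩ := List.mem_take_iff_getElem.mp hmem
    have hjk : j < k := by omega
    have hjl : j < lows.length := by omega
    have hsome : ((PySem.List.pyRange 0 (k : Int) 1).find?
        (fun i => PySem.List.pyGetD lows i "" == lows[k])).isSome := by
      rw [List.find?_isSome]
      refine ⟨(j : Int), ?_, ?_⟩
      · rw [PySem.List.mem_pyRange_one]; omega
      · rw [PySem.List.pyGetD_eq_getElem lows "" (by omega) (by exact_mod_cast hjl)]
        simp [hje]
    cases hfind : (PySem.List.pyRange 0 (k : Int) 1).find?
        (fun i => PySem.List.pyGetD lows i "" == lows[k]) with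
    | none => rw [hfind] at hsome; simp at hsome
    | some j' =>
      have hj'mem := List.mem_of_find?_eq_some hfind
      rw [PySem.List.mem_pyRange_one] at hj'mem
      simp only [Option.some_or, Option.getD_some, hmem, decide_true, Bool.not_true]
      rw [beq_eq_false_iff_ne]
      omega
  · have hnone : (PySem.List.pyRange 0 (k : Int) 1).find?
        (fun i => PySem.List.pyGetD lows i "" == lows[k]) = none := by
      rw [List.find?_eq_none]
      intro i hi
      rw [PySem.List.mem_pyRange_one] at hi
      rw [PySem.List.pyGetD_eq_getElem lows "" (by omega) (by omega)]
      simp only [beq_iff_eq]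
      intro heq
      exact hmem (List.mem_take_iff_getElem.mpr ⟨i.toNat, by omega, heq⟩)
    rw [hnone, Option.none_or,
        PySem.List.pyRange_one_cons (by exact_mod_cast hk : (k : Int) < (lows.length : Int)),
        List.find?_cons]
    rw [PySem.List.pyGetD_eq_getElem lows "" (by omega) (by exact_mod_cast hk)]
    simp [hmem]

-- B's reverse-pass-plus-positional-filter computes the ordered set of the list
theorem pv_filter_first (lows : List String) :
    ((PySem.List.enumerate lows 0).filter
        (fun p => ((PySem.List.pyRange ((lows.length : Int) - 1) (-1) (-1)).foldl
            (fun (d : PySem.Dict String Int) i => d.insert (PySem.List.pyGetD lows i "") i)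
            PySem.Dict.empty).getD p.2 (-1) == p.1)).map (·.2)
      = PySem.Set.ofList lows := by
  rw [show ((PySem.List.enumerate lows 0).filter
        (fun p => ((PySem.List.pyRange ((lows.length : Int) - 1) (-1) (-1)).foldl
            (fun (d : PySem.Dict String Int) i => d.insert (PySem.List.pyGetD lows i "") i)
            PySem.Dict.empty).getD p.2 (-1) == p.1))
      = ((PySem.List.enumerate lows 0).filter
        (fun p => !(decide (p.2 ∈ PySem.List.slice lows none (some p.1))))) from ?_,
      pv_filter_prefix]
  apply List.filter_congr
  intro p hp
  obtain ⟨k, hk, hpk⟩ := (PySem.List.mem_enumerate_iff lows 0 p).mp hp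
  subst hpk
  simp only [Int.zero_add]
  rw [PySem.List.slice_to_natCast]
  exact pv_cond lows k hk

-- zip with range(n) is enumerate, swapped / str-keyed
theorem pv_zip_range (u : List String) :
    u.zip (PySem.List.pyRange 0 (u.length : Int) 1)
      = (PySem.List.enumerate u 0).map (fun p => (p.2, p.1)) := by
  apply List.ext_getElem
  · simp [PySem.List.length_pyRange_one, PySem.List.length_enumerate]
  · intro k h1 h2
    have hk : k < u.length := by simpa using h2
    rw [List.getElem_zip, List.getElem_map, PySem.List.getElem_enumerate,
        PySem.List.getElem_pyRange_one]

theorem pv_zip_range_str (u : List String) :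
    ((PySem.List.pyRange 0 (u.length : Int) 1).map PySem.Int.toStr).zip u
      = (PySem.List.enumerate u 0).map (fun p => (PySem.Int.toStr p.1, p.2)) := by
  apply List.ext_getElem
  · simp [PySem.List.length_pyRange_one, PySem.List.length_enumerate]
  · intro k h1 h2
    have hk : k < u.length := by simpa using h2
    rw [List.getElem_zip, List.getElem_map, List.getElem_map, PySem.List.getElem_enumerate,
        PySem.List.getElem_pyRange_one]

-- dict(pairs) with pairwise-distinct keys: the items are the pairs
theorem pv_dict_of_fresh {ν : Type} (l : List (String × ν)) (h : (l.map (·.1)).Nodup) :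
    (l.foldl (fun (d : PySem.Dict String ν) p => d.insert p.1 p.2) PySem.Dict.empty).items
      = l := by
  have := PySem.Dict.items_foldl_insert_fresh (l := l) (k := (·.1)) (v := (·.2))
    (d := PySem.Dict.empty) (fun a _ => PySem.Dict.contains_empty _) h
  simpa using this

-- ===== VERDICT (by name: the statement is the Claim_ definition above) =====
theorem get_tasks_encoded_spec : Claim_equal_get_tasks_encoded := by
  intro raw _
  show get_tasks_encoded raw = get_tasks_encoded_alt raw
  unfold get_tasks_encoded get_tasks_encoded_alt
  have h := pv_loop raw [] List.nodup_nil
  simp only [pvTN, pvNT, PySem.List.enumerate_nil, List.map_nil, List.length_nil,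
    Nat.cast_zero] at h
  rw [show (PySem.Dict.mk ([] : List (String × Int))) = PySem.Dict.empty from rfl,
      show (PySem.Dict.mk ([] : List (String × String))) = PySem.Dict.empty from rfl] at h
  rw [h]
  have hu : raw.foldl (fun u f => PySem.Set.add u (PySem.Str.lower f)) [] =
      PySem.Set.ofList (raw.map PySem.Str.lower) := by
    rw [PySem.Set.ofList_eq_foldl, List.foldl_map]
  set u := raw.foldl (fun u f => PySem.Set.add u (PySem.Str.lower f)) [] with hudef
  have huniq : ((PySem.List.enumerate (raw.map PySem.Str.lower) 0).filter
      (fun p => ((PySem.List.pyRange (((raw.map PySem.Str.lower).length : Int) - 1) (-1) (-1)).foldl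
          (fun (d : PySem.Dict String Int) i => d.insert (PySem.List.pyGetD (raw.map PySem.Str.lower) i "") i)
          PySem.Dict.empty).getD p.2 (-1) == p.1)).map (·.2)
      = u := by rw [pv_filter_first, hu]
  have hnodup : u.Nodup := by rw [hu]; exact PySem.Set.nodup_ofList _
  simp only [huniq]
  rw [Prod.mk.injEq]
  constructor
  · rw [pv_zip_range, pv_dict_of_fresh]
    rw [List.map_map]
    simpa [Function.comp_def, PySem.List.map_snd_enumerate] using hnodup
  · rw [pv_zip_range_str, pv_dict_of_fresh]
    rw [List.map_map]
    simp only [Function.comp_def]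
    apply List.Nodup.map_on
    · intro p hp q hq heq
      obtain ⟨k, hk, hpk⟩ := (PySem.List.mem_enumerate_iff u 0 p).mp hp
      obtain ⟨m, hm, hqm⟩ := (PySem.List.mem_enumerate_iff u 0 q).mp hq
      subst hpk; subst hqm
      simp only [Int.zero_add] at heq ⊢
      have := pvToStr_nat_inj k m heq
      subst this
      rfl
    · have hp := PySem.List.pairwise_lt_enumerate u 0
      refine List.Pairwise.imp ?_ hp
      intro a b h hab
      subst hab
      exact lt_irrefl _ h
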